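-- pv_equiv track=rewrite | github.com/kyh-25/shortread | bruteForce.py | reconstruct_sequence_brute_force
-- ===== SOURCE A (Python) =====
-- from collections import defaultdict, Counter
--
-- def hamming_distance(s1, s2):
--     """두 문자열의 불일치도 계산"""
--     return sum(ch1 != ch2 for ch1, ch2 in zip(s1, s2))
--
-- def reconstruct_sequence_brute_force(reads, reference, max_mismatch=3):
--     coverage = defaultdict(list)
--     ref_len = len(reference)
--
--     for read, _ in reads:
--         read_len = len(read)
--         # reference 전체를 슬라이딩하며 read와 비교
--         for pos in range(ref_len - read_len + 1):
--             segment = reference[pos:pos+read_len]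
--             dist = hamming_distance(read, segment)
--             if dist <= max_mismatch:
--                 # mismatch 이하인 경우에만 커버리지에 기록
--                 for i in range(read_len):
--                     coverage[pos + i].append(read[i])
--                 # 여러 매치 중 첫 번째만 사용하려면 여기서 break 해도 됨
--                 # break
--
--     # 복원 시퀀스 생성
--     reconstructed = []
--     for i in range(ref_len):
--         bases = coverage.get(i, [])
--         if bases:
--             most_common = Counter(bases).most_common(1)[0][0]
--             reconstructed.append(most_common)
--         else:
--             reconstructed.append('N')
--
--     return ''.join(reconstructed)
-- ===== SOURCE B (Python) =====
-- def reconstruct_sequence_brute_force(reads, reference, max_mismatch=3):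
--     # Inverted-index / diagonal-accumulation algorithm: instead of sliding each read
--     # along the reference and comparing characters, index the reference's character
--     # positions once, then for each read accumulate, per alignment offset (diagonal),
--     # the number of MATCHING characters; an offset is accepted when
--     # len(read) - matches[offset] <= max_mismatch.
--     n = len(reference)
--     occ = {}
--     for j, ch in enumerate(reference):
--         occ.setdefault(ch, []).append(j)
--     counts = {}  # position -> {char: count}, built from accepted alignments
--     for read, _ in reads:
--         m = len(read)
--         limit = n - m
--         match = {}
--         for i, ch in enumerate(read):
--             for j in occ.get(ch, ()):
--                 d = j - i
--                 if 0 <= d <= limit: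
--                     match[d] = match.get(d, 0) + 1
--         for pos in range(limit + 1):
--             if m - match.get(pos, 0) <= max_mismatch:
--                 for i in range(m):
--                     c = read[i]
--                     d = counts.get(pos + i)
--                     if d is None:
--                         d = {}
--                         counts[pos + i] = d
--                     d[c] = d.get(c, 0) + 1
--     out = []
--     for i in range(n):
--         d = counts.get(i)
--         if d:
--             best = None
--             bc = -1
--             for c, k in d.items():
--                 if k > bc:
--                     best, bc = c, k
--             out.append(best)
--         else:
--             out.append('N')
--     return ''.join(out)
-- ===== Notes on version B (the rewrite author's own statement) =====
-- stated objective: alternative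
-- what changed: B replaces A's sliding-window comparison (slice the reference at every offset and compute a full Hamming distance) with an inverted index of the reference's character positions and diagonal accumulation: each read's per-offset MATCH counts are gathered by walking the index lists of its characters, an offset is accepted when len(read) - matches <= max_mismatch, and the consensus is picked by a first-max scan of on-the-fly per-position count dictionaries instead of Counter.most_common over appended lists.
import Mathlib
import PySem

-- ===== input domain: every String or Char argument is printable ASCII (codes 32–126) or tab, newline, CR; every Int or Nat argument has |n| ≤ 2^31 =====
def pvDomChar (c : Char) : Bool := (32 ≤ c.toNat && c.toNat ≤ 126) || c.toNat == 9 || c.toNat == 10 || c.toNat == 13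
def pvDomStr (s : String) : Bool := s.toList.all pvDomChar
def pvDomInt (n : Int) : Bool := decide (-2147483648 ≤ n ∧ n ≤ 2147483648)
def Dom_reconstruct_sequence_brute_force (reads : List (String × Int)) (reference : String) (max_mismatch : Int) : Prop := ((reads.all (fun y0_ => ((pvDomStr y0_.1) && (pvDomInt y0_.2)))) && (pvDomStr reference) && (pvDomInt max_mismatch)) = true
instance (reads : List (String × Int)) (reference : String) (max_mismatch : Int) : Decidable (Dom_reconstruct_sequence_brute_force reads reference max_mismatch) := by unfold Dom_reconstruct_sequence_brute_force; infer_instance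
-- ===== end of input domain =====

-- B replaces A's sliding-window slice-and-Hamming comparison with an inverted index of the
-- reference's character positions and per-offset (diagonal) match-count accumulation, and picks
-- the consensus by a first-max scan of on-the-fly count dictionaries (objective: alternative).

-- ===== PORT A =====
-- hamming_distance(s1, s2) = sum(ch1 != ch2 for ch1, ch2 in zip(s1, s2))
def pvHamming (s1 s2 : String) : Int :=
  (s1.toList.zip s2.toList).foldl (fun acc p => acc + (if p.1 ≠ p.2 then (1 : Int) else 0)) 0

-- the coverage-building loops of A (defaultdict(list); coverage[pos+i].append(read[i]))
def pvCoverage (reads : List (String × Int)) (reference : String) (max_mismatch : Int) :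
    PySem.Dict Int (List Char) :=
  reads.foldl (fun cov rp =>
    (PySem.List.pyRange 0 (PySem.Str.len reference - PySem.Str.len rp.1 + 1) 1).foldl (fun cov pos =>
      if pvHamming rp.1 (PySem.Str.slice reference (some pos) (some (pos + PySem.Str.len rp.1))) ≤ max_mismatch then
        (PySem.List.pyRange 0 (PySem.Str.len rp.1) 1).foldl (fun cov i =>
          -- read[i]: i is always in range here
          cov.insert (pos + i) (cov.getD (pos + i) [] ++ [PySem.List.pyGetD rp.1.toList i ' '])) cov
      else cov) cov) PySem.Dict.empty

def reconstruct_sequence_brute_force (reads : List (String × Int)) (reference : String) (max_mismatch : Int) : String :=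
  let coverage := pvCoverage reads reference max_mismatch
  String.ofList ((PySem.List.pyRange 0 (PySem.Str.len reference) 1).foldl (fun acc i =>
    let bases := coverage.getD i []
    if bases ≠ [] then
      -- Counter(bases).most_common(1)[0][0]: first item (in first-encounter order) with maximal count
      let items := (PySem.Dict.counter bases).items
      acc ++ [(items.foldl (fun (b : Char × Int) kv => if kv.2 > b.2 then kv else b) (items.headD (' ', 0))).1]
    else acc ++ ['N']) [])

-- ===== PORT B =====
-- the occ index of B: occ.setdefault(ch, []).append(j) over enumerate(reference)
def pvOcc (reference : String) : PySem.Dict Char (List Int) :=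
  (PySem.List.enumerate reference.toList 0).foldl
    (fun occ p => occ.insert p.2 (occ.getD p.2 [] ++ [p.1])) PySem.Dict.empty

-- B's per-read diagonal accumulation: match[j - i] += 1 for every j in occ[read[i]] with the
-- offset in range
def pvMatch (occ : PySem.Dict Char (List Int)) (read : List Char) (limit : Int) : PySem.Dict Int Int :=
  (PySem.List.enumerate read 0).foldl (fun mt p =>
    (occ.getD p.2 []).foldl (fun mt j =>
      if 0 ≤ j - p.1 ∧ j - p.1 ≤ limit then mt.insert (j - p.1) (mt.getD (j - p.1) 0 + 1) else mt) mt)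
    PySem.Dict.empty

-- the counting loops of B (counts[pos+i][ch] += 1, dicts created on demand)
def pvCounts (reads : List (String × Int)) (reference : String) (max_mismatch : Int) :
    PySem.Dict Int (PySem.Dict Char Int) :=
  let occ := pvOcc reference
  reads.foldl (fun cnts rp =>
    let m := PySem.Str.len rp.1
    let limit := PySem.Str.len reference - m
    let mt := pvMatch occ rp.1.toList limit
    (PySem.List.pyRange 0 (limit + 1) 1).foldl (fun cnts pos =>
      if m - mt.getD pos 0 ≤ max_mismatch then
        (PySem.List.pyRange 0 m 1).foldl (fun cnts i =>
          let ch := PySem.List.pyGetD rp.1.toList i ' '   -- read[i]: i always in range here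
          let d := cnts.getD (pos + i) PySem.Dict.empty
          cnts.insert (pos + i) (d.insert ch (d.getD ch 0 + 1))) cnts
      else cnts) cnts) PySem.Dict.empty

def reconstruct_sequence_brute_force_alt (reads : List (String × Int)) (reference : String) (max_mismatch : Int) : String :=
  let counts := pvCounts reads reference max_mismatch
  String.ofList ((PySem.List.pyRange 0 (PySem.Str.len reference) 1).foldl (fun acc i =>
    match (counts.getD i PySem.Dict.empty).items with
    | [] => acc ++ ['N']
    | kv0 :: rest =>   -- best = None, bc = -1; scan all items, keep the first strict max
        acc ++ [((kv0 :: rest).foldl (fun (b : Char × Int) kv => if kv.2 > b.2 then kv else b) (' ', -1)).1]) [])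

-- ===== PRECONDITION & SPEC =====
def Spec_reconstruct_sequence_brute_force (reads : List (String × Int)) (reference : String) (max_mismatch : Int) (out : String) : Prop := out = reconstruct_sequence_brute_force_alt reads reference max_mismatch
instance (reads : List (String × Int)) (reference : String) (max_mismatch : Int) (out : String) : Decidable (Spec_reconstruct_sequence_brute_force reads reference max_mismatch out) := by unfold Spec_reconstruct_sequence_brute_force; infer_instance

-- ===== CLAIM (what is proved, stated in full; the proofs are below) =====
def Claim_equal_reconstruct_sequence_brute_force : Prop := ∀ (reads : List (String × Int)) (reference : String) (max_mismatch : Int), Dom_reconstruct_sequence_brute_force reads reference max_mismatch → Spec_reconstruct_sequence_brute_force reads reference max_mismatch (reconstruct_sequence_brute_force reads reference max_mismatch)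

-- ===== LEMMAS AND PROOFS =====

-- mismatch count of A, on the list side, as a sum
def pvHamL (xs ys : List Char) : Int :=
  ((xs.zip ys).map (fun p => if p.1 ≠ p.2 then (1 : Int) else 0)).sum

lemma pvHamming_eq (s1 s2 : String) : pvHamming s1 s2 = pvHamL s1.toList s2.toList := by
  simp [pvHamming, pvHamL, PySem.List.foldl_add]

-- the occ index lists exactly the (index, char) pairs of the reference with the given char
lemma pvOcc_fold (xs : List Char) : ∀ (s : Int) (occ0 : PySem.Dict Char (List Int)) (c : Char),
    ((PySem.List.enumerate xs s).foldl
      (fun occ p => occ.insert p.2 (occ.getD p.2 [] ++ [p.1])) occ0).getD c []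
    = occ0.getD c [] ++ ((PySem.List.enumerate xs s).filter (fun p => p.2 == c)).map (·.1) := by
  induction xs with
  | nil => intro s occ0 c; simp [PySem.List.enumerate_nil]
  | cons x rest ih =>
      intro s occ0 c
      rw [PySem.List.enumerate_cons]
      simp only [List.foldl_cons, List.filter_cons]
      rw [ih]
      by_cases hc : x = c
      · subst hc
        simp [PySem.Dict.getD_insert_self]
      · have : (x == c) = false := by simp [hc]
        simp [PySem.Dict.getD_insert, Ne.symm hc, this]

lemma pvOcc_getD (reference : String) (c : Char) :
    (pvOcc reference).getD c []
      = ((PySem.List.enumerate reference.toList 0).filter (fun p => p.2 == c)).map (·.1) := by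
  rw [pvOcc, pvOcc_fold]
  simp

lemma pvOcc_count (reference : String) (c : Char) (j : Int) :
    ((((pvOcc reference).getD c []).count j : Int))
      = if 0 ≤ j ∧ reference.toList[j.toNat]? = some c then 1 else 0 := by
  rw [pvOcc_getD]
  have hnd : (((PySem.List.enumerate reference.toList 0).filter (fun p => p.2 == c)).map (·.1)).Nodup := by
    apply List.Pairwise.imp (fun {a b} (h : a ≠ b) => h)
    apply List.Pairwise.map
    · intro p q h; exact ne_of_lt h
    · exact List.Pairwise.filter _ (PySem.List.pairwise_lt_enumerate reference.toList 0)
  have hmem : j ∈ ((PySem.List.enumerate reference.toList 0).filter (fun p => p.2 == c)).map (·.1)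
      ↔ (0 ≤ j ∧ reference.toList[j.toNat]? = some c) := by
    constructor
    · intro hj
      rcases List.mem_map.mp hj with ⟨p, hp, rfl⟩
      rcases List.mem_filter.mp hp with ⟨hpe, hpc⟩
      rcases (PySem.List.mem_enumerate_iff _ _ _).mp hpe with ⟨k, hk, rfl⟩
      refine ⟨by simp, ?_⟩
      have hkn : ((0 : Int) + k).toNat = k := by omega
      rw [hkn, List.getElem?_eq_getElem hk]
      simpa using hpc
    · rintro ⟨h0, hsome⟩
      rcases List.getElem?_eq_some_iff.mp hsome with ⟨hk, hc⟩
      apply List.mem_map.mpr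
      refine ⟨(j, c), ?_, rfl⟩
      apply List.mem_filter.mpr
      refine ⟨(PySem.List.mem_enumerate_iff _ _ _).mpr ⟨j.toNat, hk, by simp [hc]; omega⟩, by simp⟩
  by_cases h : 0 ≤ j ∧ reference.toList[j.toNat]? = some c
  · rw [if_pos h]
    have h1 : 1 ≤ (((PySem.List.enumerate reference.toList 0).filter (fun p => p.2 == c)).map (·.1)).count j :=
      List.one_le_count_iff.mpr (hmem.mpr h)
    have h2 := List.nodup_iff_count_le_one.mp hnd j
    omega
  · rw [if_neg h]
    rw [List.count_eq_zero_of_not_mem (fun hj => h (hmem.mp hj))]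
    rfl

-- one character of the read: the inner fold over occ[ch] adds, at key pos, the number of
-- occurrences of pos + i in the list (when pos is an admissible offset)
lemma pvMatch_inner (L : List Int) : ∀ (mt0 : PySem.Dict Int Int) (i limit pos : Int),
    (L.foldl (fun mt j =>
        if 0 ≤ j - i ∧ j - i ≤ limit then mt.insert (j - i) (mt.getD (j - i) 0 + 1) else mt) mt0).getD pos 0
      = mt0.getD pos 0 + (if 0 ≤ pos ∧ pos ≤ limit then (L.count (pos + i) : Int) else 0) := by
  induction L with
  | nil => intro mt0 i limit pos; simp
  | cons j rest ih =>
      intro mt0 i limit pos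
      simp only [List.foldl_cons, List.count_cons, beq_iff_eq]
      by_cases hji : j = pos + i
      · subst hji
        rw [show pos + i - i = pos from by omega]
        by_cases hp : 0 ≤ pos ∧ pos ≤ limit
        · rw [if_pos hp, ih, PySem.Dict.getD_insert, if_pos rfl, if_pos hp, if_pos hp]
          simp
          ring
        · rw [if_neg hp, ih, if_neg hp, if_neg hp]
      · have hne : ¬ (j - i = pos) := by omega
        rw [if_neg hji]
        by_cases hj : 0 ≤ j - i ∧ j - i ≤ limit
        · rw [if_pos hj, ih, PySem.Dict.getD_insert, if_neg (fun h => hne h.symm)]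
          simp
        · rw [if_neg hj, ih]
          simp

-- the whole match dict: per-offset sum of occurrence counts over the read's characters
lemma pvMatch_fold (occ : PySem.Dict Char (List Int)) (read : List Char) :
    ∀ (s : Int) (mt0 : PySem.Dict Int Int) (limit pos : Int),
    ((PySem.List.enumerate read s).foldl (fun mt p =>
        (occ.getD p.2 []).foldl (fun mt j =>
          if 0 ≤ j - p.1 ∧ j - p.1 ≤ limit then mt.insert (j - p.1) (mt.getD (j - p.1) 0 + 1) else mt) mt) mt0).getD pos 0
      = mt0.getD pos 0 + ((PySem.List.enumerate read s).map (fun p =>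
          if 0 ≤ pos ∧ pos ≤ limit then (((occ.getD p.2 []).count (pos + p.1) : Int)) else 0)).sum := by
  induction read with
  | nil => intro s mt0 limit pos; simp [PySem.List.enumerate_nil]
  | cons x rest ih =>
      intro s mt0 limit pos
      rw [PySem.List.enumerate_cons]
      simp only [List.foldl_cons, List.map_cons, List.sum_cons]
      rw [ih, pvMatch_inner]
      ring

-- the per-offset sum of index hits equals (read length) − (Hamming distance to the window)
lemma pvMatch_sum (reference : String) (read : List Char) :
    ∀ (s q : Int), 0 ≤ q → q.toNat + read.length ≤ reference.toList.length →
    ((PySem.List.enumerate read s).map (fun p =>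
        (((pvOcc reference).getD p.2 []).count (q - s + p.1) : Int))).sum
      = (read.length : Int) - pvHamL read ((reference.toList.drop q.toNat).take read.length) := by
  induction read with
  | nil => intro s q hq hlen; simp [PySem.List.enumerate_nil, pvHamL]
  | cons x rest ih =>
      intro s q hq hlen
      have hlen' : q.toNat + (rest.length + 1) ≤ reference.toList.length := by
        simpa [List.length_cons] using hlen
      have hqn : q.toNat < reference.toList.length := by omega
      have hdrop : reference.toList.drop q.toNat
          = reference.toList[q.toNat] :: reference.toList.drop (q.toNat + 1) :=
        List.drop_eq_getElem_cons hqn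
      rw [PySem.List.enumerate_cons]
      simp only [List.map_cons, List.sum_cons]
      have hqs : q - s + s = q := by omega
      rw [hqs, pvOcc_count]
      have hmapeq : ((PySem.List.enumerate rest (s+1)).map (fun p =>
            (((pvOcc reference).getD p.2 []).count (q - s + p.1) : Int))).sum
          = ((PySem.List.enumerate rest (s+1)).map (fun p =>
            (((pvOcc reference).getD p.2 []).count ((q + 1) - (s + 1) + p.1) : Int))).sum := by
        congr 1
        apply List.map_congr_left
        intro p _
        rw [show q - s + p.1 = (q + 1) - (s + 1) + p.1 from by omega]
      rw [hmapeq, ih (s+1) (q+1) (by omega) (by omega)]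
      rw [hdrop]
      have htake : (reference.toList[q.toNat] :: reference.toList.drop (q.toNat + 1)).take (x :: rest).length
          = reference.toList[q.toNat] :: (reference.toList.drop (q.toNat + 1)).take rest.length := by
        simp only [List.length_cons]
        rw [List.take_succ_cons]
      rw [htake]
      have hham : pvHamL (x :: rest) (reference.toList[q.toNat] :: (reference.toList.drop (q.toNat + 1)).take rest.length)
          = (if x ≠ reference.toList[q.toNat] then (1:Int) else 0)
            + pvHamL rest ((reference.toList.drop (q.toNat + 1)).take rest.length) := by
        simp [pvHamL]
      rw [hham, show (q + 1).toNat = q.toNat + 1 from by omega]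
      by_cases hx : reference.toList[q.toNat] = x
      · rw [if_pos ⟨hq, by rw [List.getElem?_eq_getElem hqn, hx]⟩,
          if_neg (fun hne => hne hx.symm)]
        simp only [List.length_cons]
        push_cast
        ring
      · rw [if_neg (fun hcon => hx (by
            have hsome := hcon.2
            rw [List.getElem?_eq_getElem hqn] at hsome
            exact Option.some.inj hsome)),
          if_pos (fun he => hx he.symm)]
        simp only [List.length_cons]
        push_cast
        ring

-- B's acceptance test agrees with A's (Hamming distance over the slice), for offsets in range
lemma pvCond_eq (reference read : String) (pos mm : Int)
    (h0 : 0 ≤ pos) (hub : pos ≤ PySem.Str.len reference - PySem.Str.len read) :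
    (pvHamming read (PySem.Str.slice reference (some pos) (some (pos + PySem.Str.len read))) ≤ mm)
      ↔ (PySem.Str.len read
          - (pvMatch (pvOcc reference) read.toList (PySem.Str.len reference - PySem.Str.len read)).getD pos 0 ≤ mm) := by
  have hlenr : PySem.Str.len read = (read.toList.length : Int) := by rw [PySem.Str.len_eq]
  have hlenR : PySem.Str.len reference = (reference.toList.length : Int) := by rw [PySem.Str.len_eq]
  have hseg : (PySem.Str.slice reference (some pos) (some (pos + PySem.Str.len read))).toList
      = (reference.toList.drop pos.toNat).take read.toList.length := by
    have : (PySem.Str.slice reference (some pos) (some (pos + PySem.Str.len read))).toList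
        = PySem.List.slice reference.toList (some pos) (some (pos + PySem.Str.len read)) := by
      simp [PySem.Str.slice]
    rw [this, PySem.List.slice_toNat reference.toList h0 (by rw [hlenr] at *; omega)]
    congr 1
    rw [hlenr] at *
    omega
  have hmt : (pvMatch (pvOcc reference) read.toList (PySem.Str.len reference - PySem.Str.len read)).getD pos 0
      = (read.toList.length : Int) - pvHamL read.toList ((reference.toList.drop pos.toNat).take read.toList.length) := by
    rw [pvMatch, pvMatch_fold]
    rw [PySem.Dict.getD_empty]
    have hcond : (0 ≤ pos ∧ pos ≤ PySem.Str.len reference - PySem.Str.len read) := ⟨h0, hub⟩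
    have hmapeq : ((PySem.List.enumerate read.toList 0).map (fun p =>
          if 0 ≤ pos ∧ pos ≤ PySem.Str.len reference - PySem.Str.len read
          then (((pvOcc reference).getD p.2 []).count (pos + p.1) : Int) else 0))
        = ((PySem.List.enumerate read.toList 0).map (fun p =>
          (((pvOcc reference).getD p.2 []).count (pos - 0 + p.1) : Int))) := by
      apply List.map_congr_left
      intro p _
      rw [if_pos hcond]
      congr 2
      omega
    rw [hmapeq, pvMatch_sum reference read.toList 0 pos h0 (by rw [hlenr, hlenR] at hub; omega)]
    omega
  rw [pvHamming_eq, hseg, hmt, hlenr]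
  constructor <;> intro h <;> omega

-- invariant tying A's per-position base lists to B's per-position counters
def pvRel (cov : PySem.Dict Int (List Char)) (cnts : PySem.Dict Int (PySem.Dict Char Int)) : Prop :=
  ∀ i : Int, cnts.getD i PySem.Dict.empty = PySem.Dict.counter (cov.getD i [])

lemma pvRel_event {cov : PySem.Dict Int (List Char)} {cnts : PySem.Dict Int (PySem.Dict Char Int)}
    (h : pvRel cov cnts) (k : Int) (ch : Char) :
    pvRel (cov.insert k (cov.getD k [] ++ [ch]))
          (cnts.insert k ((cnts.getD k PySem.Dict.empty).insert ch ((cnts.getD k PySem.Dict.empty).getD ch 0 + 1))) := by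
  intro i
  rw [PySem.Dict.getD_insert, PySem.Dict.getD_insert]
  split_ifs with hik
  · rw [h k]
    conv_rhs => rw [← PySem.Dict.foldl_insert_getD_add_one_eq_counter]
    rw [List.foldl_append, PySem.Dict.foldl_insert_getD_add_one_eq_counter]
    rfl
  · exact h i

lemma pvRel_fold {α : Type} (l : List α)
    (f : PySem.Dict Int (List Char) → α → PySem.Dict Int (List Char))
    (g : PySem.Dict Int (PySem.Dict Char Int) → α → PySem.Dict Int (PySem.Dict Char Int))
    (hfg : ∀ cov cnts x, x ∈ l → pvRel cov cnts → pvRel (f cov x) (g cnts x)) :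
    ∀ cov cnts, pvRel cov cnts → pvRel (l.foldl f cov) (l.foldl g cnts) := by
  induction l with
  | nil => intro cov cnts h; exact h
  | cons x xs ih =>
      intro cov cnts h
      exact ih (fun c1 c2 y hy => hfg c1 c2 y (List.mem_cons_of_mem _ hy))
        _ _ (hfg cov cnts x List.mem_cons_self h)

lemma pvRel_main (reads : List (String × Int)) (reference : String) (mm : Int) :
    pvRel (pvCoverage reads reference mm) (pvCounts reads reference mm) := by
  unfold pvCoverage pvCounts
  apply pvRel_fold
  · intro cov cnts rp _ h
    apply pvRel_fold _ _ _ _ _ _ h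
    intro cov cnts pos hpos hrel
    have hr := PySem.List.mem_pyRange_one.mp hpos
    by_cases hc : pvHamming rp.1 (PySem.Str.slice reference (some pos) (some (pos + PySem.Str.len rp.1))) ≤ mm
    · rw [if_pos hc,
        if_pos ((pvCond_eq reference rp.1 pos mm hr.1 (by omega)).mp hc)]
      apply pvRel_fold _ _ _ _ _ _ hrel
      intro cov cnts i _ hrl
      exact pvRel_event hrl (pos + i) (PySem.List.pyGetD rp.1.toList i ' ')
    · rw [if_neg hc,
        if_neg (fun hw => hc ((pvCond_eq reference rp.1 pos mm hr.1 (by omega)).mpr hw))]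
      exact hrel
  · intro i
    rw [PySem.Dict.getD_empty, PySem.Dict.getD_empty]
    rfl

lemma pvItems_counter_pos (bases : List Char) (kv : Char × Int)
    (h : kv ∈ (PySem.Dict.counter bases).items) : 1 ≤ kv.2 := by
  rw [PySem.Dict.items_counter] at h
  rcases List.mem_map.mp h with ⟨k, hk, rfl⟩
  have : k ∈ bases := (PySem.Set.mem_ofList _ _).mp hk
  have := List.one_le_count_iff.mpr this
  simp
  omega

-- ===== VERDICT (by name: the statement is the Claim_ definition above) =====
theorem reconstruct_sequence_brute_force_spec : Claim_equal_reconstruct_sequence_brute_force := by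
  intro reads reference mm _
  unfold Spec_reconstruct_sequence_brute_force
  unfold reconstruct_sequence_brute_force reconstruct_sequence_brute_force_alt
  apply congrArg String.ofList
  apply PySem.List.foldl_congr_mem
  intro acc i _
  have h := pvRel_main reads reference mm i
  cases hb : (pvCoverage reads reference mm).getD i [] with
  | nil =>
      rw [hb] at h
      have hcnt : (PySem.Dict.counter ([] : List Char)).items = [] := rfl
      simp only [h, hcnt]
      simp
  | cons x xs =>
      rw [hb] at h
      cases hit : (PySem.Dict.counter (x :: xs)).items with
      | nil =>
          exfalso
          rw [PySem.Dict.items_counter] at hit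
          rcases List.map_eq_nil_iff.mp hit with h'
          have hx : x ∈ PySem.Set.ofList (x :: xs) := (PySem.Set.mem_ofList _ _).mpr List.mem_cons_self
          rw [h'] at hx
          exact List.not_mem_nil hx
      | cons kv0 rest =>
          simp only [h, hit]
          have hpos : 1 ≤ kv0.2 :=
            pvItems_counter_pos (x :: xs) kv0 (by rw [hit]; exact List.mem_cons_self)
          have hstep : ((kv0 :: rest).foldl (fun (b : Char × Int) kv => if kv.2 > b.2 then kv else b) ((' ' : Char), (-1 : Int)))
              = (rest.foldl (fun (b : Char × Int) kv => if kv.2 > b.2 then kv else b) kv0) := by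
            simp only [List.foldl_cons]
            rw [if_pos (by omega)]
          have hstepA : ((kv0 :: rest).foldl (fun (b : Char × Int) kv => if kv.2 > b.2 then kv else b) ((kv0 :: rest).headD (' ', 0)))
              = (rest.foldl (fun (b : Char × Int) kv => if kv.2 > b.2 then kv else b) kv0) := by
            simp only [List.headD_cons, List.foldl_cons]
            rw [if_neg (by omega)]
          rw [hstep, hstepA]
          simp
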